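-- pv_equiv track=rewrite | github.com/brtkev/redes-proyecto-capa-enlace | RellenoDeBits.py | eliminarBitsDeRelleno
-- ===== SOURCE A (Python) =====
-- def eliminarBitsDeRelleno(mensaje : str) -> str:
--     mensajeSinRellenoDeBits = ""
--     unosSeguidos = 0
--
--     for i in range(len(mensaje)):
--         currBit = mensaje[i]
--
--         if unosSeguidos == 5 and currBit == '0':
--             unosSeguidos = 0
--         else:
--             mensajeSinRellenoDeBits += currBit
--
--         if currBit == "1":
--             unosSeguidos += 1
--         else:
--             unosSeguidos = 0
--
--     return mensajeSinRellenoDeBits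
-- ===== SOURCE B (Python) =====
-- def eliminarBitsDeRelleno(mensaje: str) -> str:
--     # Run-based scan: find each maximal run of '1's at once; a '0' right after a
--     # run of exactly five '1's is the stuffed bit and is dropped.
--     res = []
--     i, n = 0, len(mensaje)
--     while i < n:
--         c = mensaje[i]
--         if c != '1':
--             res.append(c)
--             i += 1
--             continue
--         j = i
--         while j < n and mensaje[j] == '1':
--             j += 1
--         res.append('1' * (j - i))
--         if j - i == 5 and j < n and mensaje[j] == '0':
--             j += 1  # skip the stuffed zero
--         i = j
--     return ''.join(res)
-- ===== Notes on version B (the rewrite author's own statement) =====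
-- stated objective: alternative
-- what changed: Replaces the per-character counter state machine with a run-based scan that jumps over each maximal run of '1's at once and drops the following '0' exactly when the run has length five.
import Mathlib
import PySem

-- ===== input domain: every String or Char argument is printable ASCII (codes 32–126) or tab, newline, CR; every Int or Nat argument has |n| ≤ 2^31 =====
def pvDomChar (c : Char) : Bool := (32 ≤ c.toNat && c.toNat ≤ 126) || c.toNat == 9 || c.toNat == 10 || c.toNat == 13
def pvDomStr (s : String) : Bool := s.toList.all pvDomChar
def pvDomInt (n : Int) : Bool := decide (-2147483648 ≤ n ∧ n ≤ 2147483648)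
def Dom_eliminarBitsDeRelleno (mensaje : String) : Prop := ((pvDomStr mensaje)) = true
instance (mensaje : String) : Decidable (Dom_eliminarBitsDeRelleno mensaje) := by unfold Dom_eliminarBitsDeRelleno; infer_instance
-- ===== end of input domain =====

-- B replaces A's per-character counter state machine by a run-based scan over maximal runs of '1's; same O(n) cost, alternative structure.

-- ===== PORT A =====
-- A: one pass, counting consecutive '1's; a '0' seen while the counter is exactly 5 is dropped.
def eliminarBitsDeRelleno (mensaje : String) : String :=
  let st := mensaje.toList.foldl
    (fun (st : List Char × Int) currBit =>
      let acc := if st.2 = 5 ∧ currBit = '0' then st.1 else st.1 ++ [currBit]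
      let k : Int := if currBit = '1' then st.2 + 1 else 0
      (acc, k))
    ([], 0)
  String.mk st.1

-- ===== PORT B =====
-- B's outer while loop: each step handles one non-'1' char, or one whole maximal run of '1's
-- (skipping the following '0' when the run has length exactly 5).
def pvNext (m : Nat) (rest : List Char) : List Char :=
  if m = 5 ∧ rest.head? = some '0' then rest.tail else rest

theorem pvNext_length_le (m : Nat) (rest : List Char) : (pvNext m rest).length ≤ rest.length := by
  unfold pvNext
  split
  · simp [List.length_tail]
  · exact Nat.le_refl _

def pvRunScan : List Char → List Char
  | [] => []
  | c :: t =>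
    if c = '1' then
      ((c :: t).takeWhile (· == '1')) ++
        pvRunScan (pvNext ((c :: t).takeWhile (· == '1')).length ((c :: t).dropWhile (· == '1')))
    else c :: pvRunScan t
termination_by l => l.length
decreasing_by
  · have h1 : ((c :: t).dropWhile (· == '1')).length ≤ t.length := by
      simp only [List.dropWhile_cons]
      split
      · exact List.length_dropWhile_le _ _
      · simp_all
    have h2 := pvNext_length_le ((c :: t).takeWhile (· == '1')).length ((c :: t).dropWhile (· == '1'))
    simp only [List.length_cons]
    omega
  · simp

def eliminarBitsDeRelleno_alt (mensaje : String) : String :=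
  String.mk (pvRunScan mensaje.toList)

-- ===== PRECONDITION & SPEC =====
def Spec_eliminarBitsDeRelleno (mensaje : String) (out : String) : Prop := out = eliminarBitsDeRelleno_alt mensaje
instance (mensaje : String) (out : String) : Decidable (Spec_eliminarBitsDeRelleno mensaje out) := by unfold Spec_eliminarBitsDeRelleno; infer_instance

-- ===== CLAIM (what is proved, stated in full; the proofs are below) =====
def Claim_equal_eliminarBitsDeRelleno : Prop := ∀ (mensaje : String), Dom_eliminarBitsDeRelleno mensaje → Spec_eliminarBitsDeRelleno mensaje (eliminarBitsDeRelleno mensaje)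

-- ===== LEMMAS AND PROOFS =====

-- Recursive characterisation of A's fold (output only; counter threaded through).
def pvFA : List Char → Int → List Char
  | [], _ => []
  | c :: t, k =>
    (if k = 5 ∧ c = '0' then [] else [c]) ++ pvFA t (if c = '1' then k + 1 else 0)

theorem pvFA_foldl (l : List Char) (acc : List Char) (k : Int) :
    (l.foldl
      (fun (st : List Char × Int) currBit =>
        let a := if st.2 = 5 ∧ currBit = '0' then st.1 else st.1 ++ [currBit]
        let k' : Int := if currBit = '1' then st.2 + 1 else 0
        (a, k'))
      (acc, k)).1 = acc ++ pvFA l k := by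
  induction l generalizing acc k with
  | nil => simp [pvFA]
  | cons c t ih =>
    simp only [List.foldl_cons, pvFA]
    by_cases h : k = 5 ∧ c = '0'
    · simp [h, ih]
    · simp [h, ih]

-- A run of m ones just passes through, adding m to the counter.
theorem pvFA_ones (m : Nat) (rest : List Char) (k : Int) :
    pvFA (List.replicate m '1' ++ rest) k = List.replicate m '1' ++ pvFA rest (k + m) := by
  induction m generalizing k with
  | zero => simp
  | succ n ih =>
    simp only [List.replicate_succ, List.cons_append, pvFA, ih]
    norm_num
    rw [if_neg (by simp)]
    simp only [List.singleton_append, List.cons.injEq, true_and]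
    have h2 : k + 1 + (n : Int) = k + ((n : Int) + 1) := by ring
    rw [h2]

theorem pvTakeWhile_ones (l : List Char) :
    l.takeWhile (· == '1') = List.replicate (l.takeWhile (· == '1')).length '1' := by
  apply List.eq_replicate_of_mem
  intro b hb
  have := List.mem_takeWhile_imp hb
  simpa using this

theorem pvDropWhile_head (l : List Char) (c : Char) (t : List Char)
    (h : l.dropWhile (· == '1') = c :: t) : ¬ c = '1' := by
  have := List.head?_dropWhile_not (· == '1') l
  rw [h] at this
  simpa using this

-- pvFA from counter m on a list whose head is not '1' = pvNext then pvFA from 0.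
theorem pvFA_next (m : Nat) (rest : List Char)
    (hrest : ∀ c t, rest = c :: t → ¬ c = '1') :
    pvFA rest (0 + (m : Int)) = pvFA (pvNext m rest) 0 ++
      (if m = 5 ∧ rest.head? = some '0' then ([] : List Char) else []) := by
  match rest with
  | [] => simp [pvFA, pvNext]
  | c :: t =>
    have hc : ¬ c = '1' := hrest c t rfl
    by_cases hst : m = 5 ∧ c = '0'
    · have hcond : ((0 : Int) + m = 5 ∧ c = '0') := ⟨by rw [hst.1]; norm_num, hst.2⟩
      have hcond2 : (m = 5 ∧ (c :: t).head? = some '0') := ⟨hst.1, by simp [hst.2]⟩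
      rw [pvFA, if_pos hcond, if_neg (by simp [hc]), pvNext, if_pos hcond2]
      simp
    · have hcond : ¬((0 : Int) + m = 5 ∧ c = '0') := by
        intro h
        exact hst ⟨by omega, h.2⟩
      have hcond2 : ¬(m = 5 ∧ (c :: t).head? = some '0') := by
        intro h
        exact hst ⟨h.1, by simpa using h.2⟩
      rw [pvFA, if_neg hcond, if_neg (by simp [hc]), pvNext, if_neg hcond2, pvFA,
        if_neg (by simp), if_neg (by simp [hc])]
      simp

-- Main invariant: B's run scan computes A's state machine from counter 0.
theorem pvRunScan_eq_pvFA (l : List Char) : pvRunScan l = pvFA l 0 := by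
  induction l using pvRunScan.induct with
  | case1 => simp [pvRunScan, pvFA]
  | case2 t ih =>
    rw [pvRunScan, if_pos rfl, ih]
    conv_rhs => rw [(List.takeWhile_append_dropWhile (p := (· == '1')) (l := '1' :: t)).symm]
    conv_rhs => rw [pvTakeWhile_ones ('1' :: t)]
    rw [pvFA_ones]
    have h := pvFA_next ((('1' : Char) :: t).takeWhile (· == '1')).length
      ((('1' : Char) :: t).dropWhile (· == '1')) (fun c' t' h' => pvDropWhile_head _ _ _ h')
    rw [h]
    simp only [ite_self, List.append_nil]
    rw [← pvTakeWhile_ones]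
  | case3 c t hc ih =>
    rw [pvRunScan, if_neg hc, ih, pvFA]
    rw [if_neg (by simp), if_neg (by simp [hc])]
    simp

-- ===== VERDICT (by name: the statement is the Claim_ definition above) =====
theorem eliminarBitsDeRelleno_spec : Claim_equal_eliminarBitsDeRelleno := by
  intro mensaje _
  unfold Spec_eliminarBitsDeRelleno eliminarBitsDeRelleno eliminarBitsDeRelleno_alt
  simp only [pvFA_foldl, List.nil_append, pvRunScan_eq_pvFA]
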